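-- pv_equiv track=rewrite | github.com/Wiradjuri/project-structure-creator | project_structure_creator/main.py | _has_file_extension
-- ===== SOURCE A (Python) =====
-- def _has_file_extension(name: str) -> bool:
--     """Check if a name has a file extension"""
--     # Known file extensions
--     file_extensions = {
--         '.txt', '.md', '.py', '.js', '.ts', '.html', '.css', '.json', '.xml', '.yml', '.yaml',
--         '.java', '.kt', '.swift', '.cpp', '.c', '.h', '.cs', '.php', '.rb', '.go', '.rs',
--         '.gradle', '.pro', '.properties', '.manifest', '.gitignore', '.dockerfile',
--         '.png', '.jpg', '.jpeg', '.gif', '.svg', '.ico', '.pdf', '.zip', '.tar', '.gz'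
--     }
--
--     name_lower = name.lower()
--
--     # Check for known extensions
--     for ext in file_extensions:
--         if name_lower.endswith(ext):
--             return True
--
--     # Check for files with dots but unknown extensions
--     if '.' in name and not name.startswith('.'):
--         parts = name.split('.')
--         if len(parts) > 1 and parts[-1]:  # Has extension and it's not empty
--             return True
--
--     # Special cases for files without extensions
--     special_files = {
--         'readme', 'license', 'changelog', 'makefile', 'dockerfile', 'gemfile',
--         'rakefile', 'gulpfile', 'gruntfile', 'package-lock', 'yarn'
--     }
--
--     return name_lower in special_files
-- ===== SOURCE B (Python) =====
-- def _has_file_extension(name: str) -> bool: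
--     """Check if a name has a file extension"""
--     exts = set(
--         'txt md py js ts html css json xml yml yaml '
--         'java kt swift cpp c h cs php rb go rs '
--         'gradle pro properties manifest gitignore dockerfile '
--         'png jpg jpeg gif svg ico pdf zip tar gz'.split())
--     specials = set(
--         'readme license changelog makefile dockerfile gemfile '
--         'rakefile gulpfile gruntfile package-lock yarn'.split())
--
--     nl = name.lower()
--
--     # One forward pass: note whether a dot occurs and accumulate the
--     # (lowercased) text after the most recent dot.
--     seen_dot = False
--     ext = ''
--     for c in nl:
--         if c == '.':
--             seen_dot = True
--             ext = ''
--         else: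
--             ext += c
--
--     if seen_dot and ext in exts:
--         return True
--     if seen_dot and not name.startswith('.') and ext:
--         return True
--     return nl in specials
-- ===== Notes on version B (the rewrite author's own statement) =====
-- stated objective: alternative
-- what changed: Replaces A's 38-iteration endswith scan and split-based last-segment test with a single forward pass over the lowercased name that accumulates the text after the most recent dot, then two set lookups on that accumulated suffix.
import Mathlib
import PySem

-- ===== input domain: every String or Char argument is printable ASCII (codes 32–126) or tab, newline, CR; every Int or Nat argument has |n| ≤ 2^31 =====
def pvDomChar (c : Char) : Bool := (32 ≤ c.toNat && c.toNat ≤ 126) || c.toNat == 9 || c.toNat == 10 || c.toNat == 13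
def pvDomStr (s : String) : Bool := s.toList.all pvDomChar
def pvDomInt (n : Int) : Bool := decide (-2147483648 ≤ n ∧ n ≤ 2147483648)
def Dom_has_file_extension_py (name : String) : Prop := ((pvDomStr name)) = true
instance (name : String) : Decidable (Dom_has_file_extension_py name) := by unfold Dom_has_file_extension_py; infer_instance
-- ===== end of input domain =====

set_option maxRecDepth 8000

-- B replaces A's 38-iteration endswith scan and split-based test by ONE forward pass that
-- accumulates the text after the most recent dot, followed by two set lookups (alternative decomposition).

-- ===== PORT A =====
-- A's literal extension set (with leading dots) and special-name set
def pvExtsA : List String :=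
  [".txt", ".md", ".py", ".js", ".ts", ".html", ".css", ".json", ".xml", ".yml", ".yaml",
   ".java", ".kt", ".swift", ".cpp", ".c", ".h", ".cs", ".php", ".rb", ".go", ".rs",
   ".gradle", ".pro", ".properties", ".manifest", ".gitignore", ".dockerfile",
   ".png", ".jpg", ".jpeg", ".gif", ".svg", ".ico", ".pdf", ".zip", ".tar", ".gz"]

def pvSpecialsA : List String :=
  ["readme", "license", "changelog", "makefile", "dockerfile", "gemfile",
   "rakefile", "gulpfile", "gruntfile", "package-lock", "yarn"]

def has_file_extension_py (name : String) : Bool :=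
  let name_lower := PySem.Str.lower name
  -- for ext in file_extensions: if name_lower.endswith(ext): return True
  if pvExtsA.any (fun ext => PySem.Str.endswith name_lower ext) then
    true
  -- if '.' in name and not name.startswith('.'):
  else if PySem.Str.isIn "." name && !(PySem.Str.startswith name ".") then
    -- parts = name.split('.'); if len(parts) > 1 and parts[-1]: return True
    let parts := PySem.Chars.splitOn name.toList ['.']
    if decide (1 < parts.length) && !(((PySem.List.pyGet? parts (-1)).getD []).isEmpty) then
      true
    else
      pvSpecialsA.contains name_lower
  else
    pvSpecialsA.contains name_lower

-- ===== PORT B =====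
-- B's bare extension words and special names, written as one space-separated string each
def pvExtWords : List String :=
  PySem.Str.split₀ "txt md py js ts html css json xml yml yaml java kt swift cpp c h cs php rb go rs gradle pro properties manifest gitignore dockerfile png jpg jpeg gif svg ico pdf zip tar gz"

def pvSpecialWords : List String :=
  PySem.Str.split₀ "readme license changelog makefile dockerfile gemfile rakefile gulpfile gruntfile package-lock yarn"

-- body of B's single loop: remember a dot, restart the extension buffer at each dot
def pvStep (s : Bool × String) (c : Char) : Bool × String :=
  if c == '.' then (true, "") else (s.1, s.2.push c)

def has_file_extension_py_alt (name : String) : Bool :=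
  let nl := PySem.Str.lower name
  -- seen_dot, ext accumulated in one pass over nl
  let st := nl.toList.foldl pvStep (false, "")
  if st.1 && pvExtWords.contains st.2 then
    true
  else if st.1 && !(PySem.Str.startswith name ".") && !(st.2 == "") then
    true
  else
    pvSpecialWords.contains nl

-- ===== PRECONDITION & SPEC =====
def Spec_has_file_extension_py (name : String) (out : Bool) : Prop := out = has_file_extension_py_alt name
instance (name : String) (out : Bool) : Decidable (Spec_has_file_extension_py name out) := by unfold Spec_has_file_extension_py; infer_instance

-- ===== CLAIM (what is proved, stated in full; the proofs are below) =====
def Claim_equal_has_file_extension_py : Prop := ∀ (name : String), Dom_has_file_extension_py name → Spec_has_file_extension_py name (has_file_extension_py name)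

-- ===== LEMMAS AND PROOFS =====

-- the characters after the last '.' of l (all of l if there is no '.')
def afterDot (l : List Char) : List Char := (l.reverse.takeWhile (fun c => !(c == '.'))).reverse

-- the trailing dot-segment: '.' together with everything after the last '.'
def tailSeg (l : List Char) : List Char := '.' :: afterDot l

-- pure model of name.split('.')
def splitDot : List Char → List (List Char)
  | [] => [[]]
  | c :: rest => if c = '.' then [] :: splitDot rest else (splitDot rest).modifyHead (c :: ·)

theorem takeWhileDot_append_dot (a t : List Char) :
    List.takeWhile (fun c => !(c == '.')) (a ++ '.' :: t) = List.takeWhile (fun c => !(c == '.')) a := by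
  rw [List.takeWhile_append]
  split
  · next h =>
      rw [(List.takeWhile_prefix _).eq_of_length h]
      simp
  · rfl

theorem takeWhileDot_append_of_mem {a : List Char} (h : '.' ∈ a) (b : List Char) :
    List.takeWhile (fun c => !(c == '.')) (a ++ b) = List.takeWhile (fun c => !(c == '.')) a := by
  rw [List.takeWhile_append]
  split
  · next hl =>
      exfalso
      have heq := (List.takeWhile_prefix (l := a) (fun c => !(c == '.'))).eq_of_length hl
      have := List.takeWhile_eq_self_iff.mp heq '.' h
      simp at this
  · rfl

theorem splitDot_ne_nil (l : List Char) : splitDot l ≠ [] := by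
  induction l with
  | nil => simp [splitDot]
  | cons c rest ih =>
      simp only [splitDot]
      split
      · simp
      · cases h : splitDot rest with
        | nil => exact absurd h ih
        | cons q qs => simp [List.modifyHead]

theorem length_splitDot (l : List Char) : (splitDot l).length = l.count '.' + 1 := by
  induction l with
  | nil => simp [splitDot]
  | cons c rest ih =>
      simp only [splitDot]
      split
      · next hc => simp [hc, ih]
      · next hc =>
          rw [List.length_modifyHead, ih, List.count_cons]
          simp [hc]

theorem splitDot_not_mem {l : List Char} (h : '.' ∉ l) : splitDot l = [l] := by
  induction l with
  | nil => rfl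
  | cons c rest ih =>
      have hc : c ≠ '.' := fun hc => h (hc ▸ List.mem_cons_self)
      have hr : '.' ∉ rest := fun hr => h (List.mem_cons_of_mem _ hr)
      simp [splitDot, hc, ih hr, List.modifyHead]

theorem afterDot_of_not_mem {l : List Char} (h : '.' ∉ l) : afterDot l = l := by
  unfold afterDot
  rw [List.takeWhile_eq_self_iff.mpr, List.reverse_reverse]
  intro x hx
  simp only [List.mem_reverse] at hx
  simp only [Bool.not_eq_true', beq_eq_false_iff_ne, ne_eq]
  rintro rfl
  exact h hx

theorem afterDot_dot_cons (rest : List Char) : afterDot ('.' :: rest) = afterDot rest := by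
  unfold afterDot
  rw [List.reverse_cons, takeWhileDot_append_dot rest.reverse []]

theorem afterDot_cons_of_mem {rest : List Char} (c : Char) (h : '.' ∈ rest) :
    afterDot (c :: rest) = afterDot rest := by
  unfold afterDot
  rw [List.reverse_cons, takeWhileDot_append_of_mem (by simpa using h) [c]]

theorem getLast?_splitDot (l : List Char) : (splitDot l).getLast? = some (afterDot l) := by
  induction l with
  | nil => simp [splitDot, afterDot]
  | cons c rest ih =>
      by_cases hc : c = '.'
      · subst hc
        rw [show splitDot ('.' :: rest) = [] :: splitDot rest from by simp [splitDot],
          afterDot_dot_cons]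
        cases h : splitDot rest with
        | nil => exact absurd h (splitDot_ne_nil rest)
        | cons q qs =>
            rw [h] at ih
            rw [List.getLast?_cons_cons]
            exact ih
      · by_cases hm : '.' ∈ rest
        · rw [afterDot_cons_of_mem c hm,
            show splitDot (c :: rest) = (splitDot rest).modifyHead (c :: ·) from by
              simp [splitDot, hc]]
          cases h : splitDot rest with
          | nil => exact absurd h (splitDot_ne_nil rest)
          | cons q qs =>
              obtain ⟨q2, qs2, hq2⟩ : ∃ q2 qs2, qs = q2 :: qs2 := by
                cases hqq : qs with
                | nil =>
                    exfalso
                    have hlen := length_splitDot rest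
                    rw [h, hqq] at hlen
                    have hcnt : 0 < rest.count '.' := List.count_pos_iff.mpr hm
                    simp at hlen
                    omega
                | cons q2 qs2 => exact ⟨q2, qs2, rfl⟩
              subst hq2
              rw [h] at ih
              rw [List.modifyHead_cons, List.getLast?_cons_cons]
              rw [List.getLast?_cons_cons] at ih
              exact ih
        · have hnm : '.' ∉ (c :: rest) := by
            intro hmem
            rcases List.mem_cons.mp hmem with h1 | h2
            · exact hc h1.symm
            · exact hm h2
          rw [splitDot_not_mem hnm, afterDot_of_not_mem hnm]
          simp

theorem splitOn_go_eq (l : List Char) : ∀ (fuel : Nat) (cur : List Char) (acc : List (List Char)),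
    l.length ≤ fuel →
    PySem.Chars.splitOn.go ['.'] fuel l cur acc =
      acc.reverse ++ (splitDot l).modifyHead (fun x => cur.reverse ++ x) := by
  induction l with
  | nil =>
      intro fuel cur acc _
      cases fuel <;> simp [PySem.Chars.splitOn.go.eq_def, splitDot, List.modifyHead]
  | cons c rest ih =>
      intro fuel cur acc hfuel
      cases fuel with
      | zero => simp at hfuel
      | succ f =>
          have hf : rest.length ≤ f := by
            simp only [List.length_cons] at hfuel
            omega
          rw [show PySem.Chars.splitOn.go ['.'] (f + 1) (c :: rest) cur acc =
              if List.isPrefixOf ['.'] (c :: rest) = true then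
                PySem.Chars.splitOn.go ['.'] f (List.drop (['.'] : List Char).length (c :: rest)) []
                  (cur.reverse :: acc)
              else PySem.Chars.splitOn.go ['.'] f rest (c :: cur) acc from rfl]
          by_cases hc : c = '.'
          · subst hc
            rw [if_pos (by simp [List.isPrefixOf])]
            rw [show List.drop (['.'] : List Char).length ('.' :: rest) = rest from rfl]
            rw [ih f [] (cur.reverse :: acc) hf]
            simp only [splitDot, List.reverse_cons, List.reverse_nil, List.nil_append]
            cases h : splitDot rest with
            | nil => exact absurd h (splitDot_ne_nil rest)
            | cons q qs => simp [List.modifyHead]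
          · rw [if_neg (by simp [List.isPrefixOf]; intro h; exact hc h.symm)]
            rw [ih f (c :: cur) acc hf]
            simp only [splitDot, if_neg hc]
            cases h : splitDot rest with
            | nil => exact absurd h (splitDot_ne_nil rest)
            | cons q qs => simp [List.modifyHead]

theorem splitOn_eq_splitDot (l : List Char) : PySem.Chars.splitOn l ['.'] = splitDot l := by
  unfold PySem.Chars.splitOn
  rw [splitOn_go_eq l (l.length + 1) [] [] (Nat.le_succ _)]
  cases h : splitDot l with
  | nil => exact absurd h (splitDot_ne_nil l)
  | cons q qs => simp [List.modifyHead]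

theorem dropWhile_head_false {p : Char → Bool} :
    ∀ (l : List Char) (d : Char) (dt : List Char), List.dropWhile p l = d :: dt → p d = false := by
  intro l
  induction l with
  | nil => intro d dt h; simp at h
  | cons a t ih =>
      intro d dt h
      rw [List.dropWhile_cons] at h
      split at h
      · exact ih _ _ h
      · next hpa =>
          cases h
          simpa using hpa

theorem tailSeg_suffix {l : List Char} (h : '.' ∈ l) : tailSeg l <:+ l := by
  have hdw : List.dropWhile (fun c => !(c == '.')) l.reverse ≠ [] := by
    intro hnil
    have htw : List.takeWhile (fun c => !(c == '.')) l.reverse = l.reverse := by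
      have haux := List.takeWhile_append_dropWhile (p := fun c => !(c == '.')) (l := l.reverse)
      rw [hnil, List.append_nil] at haux
      exact haux
    have := List.takeWhile_eq_self_iff.mp htw '.' (by simpa using h)
    simp at this
  obtain ⟨d, dt, hd⟩ : ∃ d dt, List.dropWhile (fun c => !(c == '.')) l.reverse = d :: dt := by
    cases hdd : List.dropWhile (fun c => !(c == '.')) l.reverse with
    | nil => exact absurd hdd hdw
    | cons d dt => exact ⟨d, dt, rfl⟩
  have hdp : d = '.' := by
    have := dropWhile_head_false l.reverse d dt hd
    simpa using this
  subst hdp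
  have hrev : l.reverse = List.takeWhile (fun c => !(c == '.')) l.reverse ++ '.' :: dt := by
    conv_lhs => rw [← List.takeWhile_append_dropWhile (p := fun c => !(c == '.')) (l := l.reverse)]
    rw [hd]
  refine ⟨dt.reverse, ?_⟩
  have hl := congrArg List.reverse hrev
  rw [List.reverse_reverse] at hl
  rw [hl]
  simp only [tailSeg, afterDot, List.reverse_append, List.reverse_cons, List.reverse_reverse,
    List.reverse_nil, List.nil_append, List.singleton_append]
  rw [takeWhileDot_append_dot]
  rw [List.takeWhile_eq_self_iff.mpr
    (fun x hx => List.mem_takeWhile_imp (p := fun c => !(c == '.')) hx)]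
  simp

theorem endswith_ext {l e : List Char} (hh : e.head? = some '.') (ht : '.' ∉ e.tail) :
    PySem.Chars.endswith l e = (decide ('.' ∈ l) && (tailSeg l == e)) := by
  obtain ⟨r, rfl⟩ : ∃ r, e = '.' :: r := by
    cases e with
    | nil => simp at hh
    | cons a t =>
        simp only [List.head?_cons, Option.some.injEq] at hh
        exact ⟨t, by rw [hh]⟩
  simp only [List.tail_cons] at ht
  rw [Bool.eq_iff_iff, PySem.Chars.endswith_iff]
  simp only [Bool.and_eq_true, decide_eq_true_eq, beq_iff_eq]
  constructor
  · rintro ⟨p, hp⟩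
    have hmem : '.' ∈ l := by rw [← hp]; simp
    refine ⟨hmem, ?_⟩
    unfold tailSeg afterDot
    rw [← hp, List.reverse_append, List.reverse_cons, List.append_assoc, List.singleton_append,
      takeWhileDot_append_dot,
      List.takeWhile_eq_self_iff.mpr (by
        intro x hx
        simp only [List.mem_reverse] at hx
        simp only [Bool.not_eq_true', beq_eq_false_iff_ne, ne_eq]
        rintro rfl
        exact ht hx),
      List.reverse_reverse]
  · rintro ⟨hmem, hts⟩
    exact hts ▸ tailSeg_suffix hmem

theorem any_endswith (l : List Char) (es : List (List Char))
    (h : ∀ e ∈ es, e.head? = some '.' ∧ '.' ∉ e.tail) :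
    (es.any (fun e => PySem.Chars.endswith l e)) = (decide ('.' ∈ l) && es.contains (tailSeg l)) := by
  induction es with
  | nil => simp
  | cons e es ih =>
      have he := h e List.mem_cons_self
      rw [List.any_cons, endswith_ext he.1 he.2, ih (fun x hx => h x (List.mem_cons_of_mem _ hx)),
        List.contains_cons, Bool.and_or_distrib_left]

theorem isIn_dot_iff (s : List Char) : PySem.Chars.isIn ['.'] s = decide ('.' ∈ s) := by
  rw [Bool.eq_iff_iff, decide_eq_true_eq, PySem.Chars.isIn_iff_infix]
  constructor
  · rintro ⟨p, t, hpt⟩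
    rw [← hpt]
    simp
  · intro hmem
    obtain ⟨p, t, hpt⟩ := List.append_of_mem hmem
    exact ⟨p, t, by rw [hpt]; simp⟩

theorem strContains_iff (es : List String) (s : String) :
    es.contains s = (es.map String.toList).contains s.toList := by
  induction es with
  | nil => rfl
  | cons e rest ih =>
      rw [List.map_cons, List.contains_cons, List.contains_cons, ih]
      congr 1
      rw [Bool.eq_iff_iff, beq_iff_eq, beq_iff_eq, String.toList_inj]

theorem contains_cons_map (es : List (List Char)) (c : Char) (x : List Char) :
    ((es.map (fun e => c :: e)).contains (c :: x)) = es.contains x := by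
  induction es with
  | nil => rfl
  | cons e rest ih =>
      rw [List.map_cons, List.contains_cons, List.contains_cons, ih]
      congr 1
      rw [Bool.eq_iff_iff, beq_iff_eq, beq_iff_eq, List.cons.injEq]
      simp

theorem pyGet?_neg_one {α : Type} (xs : List α) (h : xs ≠ []) :
    PySem.List.pyGet? xs (-1) = xs.getLast? := by
  have hn : 0 < xs.length := List.length_pos_iff.mpr h
  simp only [PySem.List.pyGet?, PySem.List.pyIdx?]
  rw [if_neg (by omega), if_pos (by omega)]
  have h1 : ((-(-1 : Int)).toNat) = 1 := by decide
  rw [h1]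
  simp [List.getLast?_eq_getElem?]

-- lowercasing never creates or destroys a dot
theorem lowerChar_eq_dot (c : Char) : (PySem.Chars.lowerChar c == '.') = (c == '.') := by
  simp only [PySem.Chars.lowerChar, PySem.Chars.isupper]
  split
  · next h =>
      simp only [Bool.and_eq_true, decide_eq_true_eq, Char.le_def] at h
      have hA : 65 ≤ c.toNat := h.1
      have hZ : c.toNat ≤ 90 := h.2
      rw [Bool.eq_iff_iff, beq_iff_eq, beq_iff_eq]
      constructor
      · intro hd
        have := congrArg Char.toNat hd
        rw [Char.toNat_ofNat, if_pos (Or.inl (by omega))] at this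
        have hdot : ('.' : Char).toNat = 46 := by decide
        omega
      · intro hd; subst hd
        exfalso
        revert hA; decide
  · rfl

theorem mem_dot_map (l : List Char) : ('.' ∈ l.map PySem.Chars.lowerChar) ↔ ('.' ∈ l) := by
  rw [List.mem_map]
  constructor
  · rintro ⟨x, hx, hfx⟩
    have := lowerChar_eq_dot x
    rw [Bool.eq_iff_iff, beq_iff_eq, beq_iff_eq] at this
    exact (this.mp hfx) ▸ hx
  · intro h
    exact ⟨'.', h, by decide⟩

theorem afterDot_map (l : List Char) :
    afterDot (l.map PySem.Chars.lowerChar) = (afterDot l).map PySem.Chars.lowerChar := by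
  unfold afterDot
  have hp : (fun c => !(c == '.')) ∘ PySem.Chars.lowerChar = (fun c => !(c == '.')) := by
    funext c
    simp only [Function.comp_apply, lowerChar_eq_dot]
  rw [← List.map_reverse, List.takeWhile_map, hp, List.map_reverse]

theorem toList_lower_eq_map (s : String) :
    (PySem.Str.lower s).toList = s.toList.map PySem.Chars.lowerChar := by
  simp [PySem.Chars.lower]

-- the single pass of B: first component records a dot, second is the text after the last dot
theorem foldl_pvStep_fst (l : List Char) : ∀ (b : Bool) (e : String),
    (l.foldl pvStep (b, e)).1 = (b || decide ('.' ∈ l)) := by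
  induction l with
  | nil => intro b e; simp
  | cons c rest ih =>
      intro b e
      rw [List.foldl_cons]
      by_cases hc : c = '.'
      · subst hc
        rw [show pvStep (b, e) '.' = (true, "") from rfl, ih]
        simp
      · rw [show pvStep (b, e) c = (b, e.push c) from by simp [pvStep, hc], ih]
        have hcm : ('.' ∈ c :: rest) ↔ ('.' ∈ rest) := by
          rw [List.mem_cons]
          exact or_iff_right (fun h => hc h.symm)
        rw [show (decide ('.' ∈ c :: rest)) = (decide ('.' ∈ rest)) from by simp [hcm]]

theorem foldl_pvStep_snd (l : List Char) : ∀ (b : Bool) (e : String),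
    (l.foldl pvStep (b, e)).2.toList = if '.' ∈ l then afterDot l else e.toList ++ l := by
  induction l with
  | nil => intro b e; simp
  | cons c rest ih =>
      intro b e
      rw [List.foldl_cons]
      by_cases hc : c = '.'
      · subst hc
        rw [show pvStep (b, e) '.' = (true, "") from rfl, ih]
        rw [if_pos List.mem_cons_self, afterDot_dot_cons]
        by_cases hm : '.' ∈ rest
        · rw [if_pos hm]
        · rw [if_neg hm, afterDot_of_not_mem hm]
          simp
      · rw [show pvStep (b, e) c = (b, e.push c) from by simp [pvStep, hc], ih]
        by_cases hm : '.' ∈ rest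
        · rw [if_pos hm, if_pos (List.mem_cons_of_mem _ hm), afterDot_cons_of_mem c hm]
        · have hcm : '.' ∉ (c :: rest) := by
            intro hmem
            rcases List.mem_cons.mp hmem with h1 | h2
            · exact hc h1.symm
            · exact hm h2
          rw [if_neg hm, if_neg hcm]
          simp

theorem dotStr_toList : (".".toList : List Char) = ['.'] := by decide

theorem extsA_shape : ∀ e ∈ pvExtsA.map String.toList, e.head? = some '.' ∧ '.' ∉ e.tail := by decide

theorem extsA_eq_words : pvExtsA.map String.toList = (pvExtWords.map String.toList).map (fun e => '.' :: e) := by decide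

theorem specials_eq : pvSpecialsA = pvSpecialWords := by decide

theorem main_eq (name : String) : has_file_extension_py name = has_file_extension_py_alt name := by
  simp only [has_file_extension_py, has_file_extension_py_alt]
  set nl := PySem.Str.lower name with hnl
  have hA1 : pvExtsA.any (fun ext => PySem.Str.endswith nl ext)
      = (decide ('.' ∈ nl.toList) && (pvExtsA.map String.toList).contains (tailSeg nl.toList)) := by
    simp only [PySem.Str.endswith_eq]
    exact (List.any_map (f := String.toList) (l := pvExtsA)
      (p := fun e => PySem.Chars.endswith nl.toList e)).symm.trans (any_endswith nl.toList _ extsA_shape)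
  have hfst := foldl_pvStep_fst nl.toList false ""
  have hsnd := foldl_pvStep_snd nl.toList false ""
  rw [Bool.false_or] at hfst
  have hnlmap : nl.toList = name.toList.map PySem.Chars.lowerChar := toList_lower_eq_map name
  have hmemiff : ('.' ∈ nl.toList) ↔ ('.' ∈ name.toList) := by
    rw [hnlmap]; exact mem_dot_map name.toList
  rw [specials_eq, hA1, hfst]
  by_cases hmem : '.' ∈ nl.toList
  · have hdm : decide ('.' ∈ nl.toList) = true := decide_eq_true hmem
    have hsnd' : (nl.toList.foldl pvStep (false, "")).2.toList = afterDot nl.toList := by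
      rw [hsnd, if_pos hmem]
    have hcontains : pvExtWords.contains (nl.toList.foldl pvStep (false, "")).2
        = (pvExtsA.map String.toList).contains (tailSeg nl.toList) := by
      rw [strContains_iff, hsnd', extsA_eq_words, tailSeg, contains_cons_map]
    rw [hdm, hcontains, Bool.true_and, Bool.true_and]
    cases hc1 : (pvExtsA.map String.toList).contains (tailSeg nl.toList) with
    | true => simp
    | false =>
        simp only [Bool.false_eq_true, if_false]
        have hin : PySem.Str.isIn "." name = true := by
          rw [PySem.Str.isIn_eq, dotStr_toList, isIn_dot_iff]
          exact decide_eq_true (hmemiff.mp hmem)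
        rw [hin, Bool.true_and]
        cases hsw : PySem.Str.startswith name "." with
        | true => simp
        | false =>
            simp only [Bool.not_false, Bool.true_and]
            have hmemn : '.' ∈ name.toList := hmemiff.mp hmem
            have hsplit : PySem.Chars.splitOn name.toList ['.'] = splitDot name.toList :=
              splitOn_eq_splitDot _
            have hlen : decide (1 < (PySem.Chars.splitOn name.toList ['.']).length) = true := by
              rw [hsplit, decide_eq_true_eq, length_splitDot]
              have := List.count_pos_iff.mpr hmemn
              omega
            have hlast : ((PySem.List.pyGet? (PySem.Chars.splitOn name.toList ['.']) (-1)).getD [])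
                = afterDot name.toList := by
              rw [hsplit, pyGet?_neg_one _ (splitDot_ne_nil _), getLast?_splitDot]
              rfl
            have hemp : ((nl.toList.foldl pvStep (false, "")).2 == "")
                = (afterDot name.toList).isEmpty := by
              rw [Bool.eq_iff_iff, beq_iff_eq, List.isEmpty_iff, ← String.toList_inj, hsnd']
              rw [hnlmap, afterDot_map]
              simp
            rw [hlen, hlast, hemp, Bool.true_and]
            cases h2 : (afterDot name.toList).isEmpty <;> simp
  · have hdm : decide ('.' ∈ nl.toList) = false := decide_eq_false hmem
    have hin : PySem.Str.isIn "." name = false := by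
      rw [PySem.Str.isIn_eq, dotStr_toList, isIn_dot_iff]
      exact decide_eq_false (fun h => hmem (hmemiff.mpr h))
    rw [hdm, hin]
    simp

-- ===== VERDICT (by name: the statement is the Claim_ definition above) =====
theorem has_file_extension_py_spec : Claim_equal_has_file_extension_py := by
  intro name _
  unfold Spec_has_file_extension_py
  exact main_eq name
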